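-- pv_equiv track=rewrite | github.com/ZohaibVehra/Cowabunga | Utils.py | tagFormat
-- ===== SOURCE A (Python) =====
-- def tagFormat(input_string):
--     # Remove trailing commas and commas at the start
--     input_string = input_string.strip(',').lstrip(',')
--
--     # Remove spaces before commas
--     while ' ,' in input_string:
--         input_string = input_string.replace(' ,', ',')
--
--     # Add a space after each comma
--     input_string = input_string.replace(',', ', ')
--
--     while ', ' in input_string:
--         input_string = input_string.replace(', ', ',')
--
--     input_string = input_string.replace(',', ', ')
--     return input_string
-- ===== SOURCE B (Python) =====
-- def tagFormat(input_string):
--     # One right-to-left pass over the comma-stripped string, maintaining the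
--     # normalized suffix (reversed) on a stack, instead of repeated global
--     # replace passes.
--     s = input_string.strip(',')
--     rout = []  # reversed characters of the normalized suffix seen so far
--     for c in reversed(s):
--         if c == ',':
--             while rout and rout[-1] == ' ':
--                 rout.pop()
--             rout.append(' ')
--             rout.append(',')
--         elif c == ' ':
--             if not (len(rout) >= 2 and rout[-1] == ',' and rout[-2] == ' '):
--                 rout.append(' ')
--         else:
--             rout.append(c)
--     return ''.join(reversed(rout))
-- ===== Notes on version B (the rewrite author's own statement) =====
-- stated objective: alternative
-- what changed: A repeatedly runs global replace passes (two fixpoint while-loops over ' ,'/', ' plus three more replaces) over the whole string; B makes a single right-to-left pass over the comma-stripped string, maintaining the normalized suffix on a stack (pop spaces before a comma, skip spaces after it, emit ', ' per comma).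
import Mathlib
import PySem

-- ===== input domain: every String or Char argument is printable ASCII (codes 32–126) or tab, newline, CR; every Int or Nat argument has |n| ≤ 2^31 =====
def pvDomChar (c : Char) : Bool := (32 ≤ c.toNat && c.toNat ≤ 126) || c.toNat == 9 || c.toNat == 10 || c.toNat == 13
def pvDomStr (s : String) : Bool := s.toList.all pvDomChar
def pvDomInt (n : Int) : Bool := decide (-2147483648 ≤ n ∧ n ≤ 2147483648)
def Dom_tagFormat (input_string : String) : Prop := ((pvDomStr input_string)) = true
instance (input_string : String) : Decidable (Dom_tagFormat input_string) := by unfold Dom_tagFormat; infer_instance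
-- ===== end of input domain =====

-- B replaces A's repeated global replace passes by a single right-to-left pass over the
-- comma-stripped string maintaining a stack of the normalized suffix (objective: alternative;
-- same return value, no mutation of arguments in either version).

-- ===== PORT A =====
-- `s.replace(old, new)` characterised as a clean structural recursion (used by the port's
-- termination proofs, cited by name in `decreasing_by`).
def pvRep (old new : List Char) : List Char → List Char
  | [] => []
  | c :: t =>
    if old.isPrefixOf (c :: t) then new ++ pvRep old new (t.drop (old.length - 1))
    else c :: pvRep old new t
termination_by l => l.length
decreasing_by
  all_goals simp only [List.length_drop, List.length_cons]
  all_goals omega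

theorem pvRep_go (old new : List Char) (hold : old ≠ []) :
    ∀ (fuel : Nat) (l acc : List Char), l.length ≤ fuel →
      PySem.Chars.replace.go old new fuel l acc = acc.reverse ++ pvRep old new l := by
  intro fuel
  induction fuel with
  | zero =>
    intro l acc hl
    have : l = [] := List.eq_nil_of_length_eq_zero (Nat.le_zero.mp hl)
    subst this
    simp [PySem.Chars.replace.go, pvRep]
  | succ n ih =>
    intro l acc hl
    match l with
    | [] => simp [PySem.Chars.replace.go, pvRep]
    | c :: t =>
      rw [PySem.Chars.replace.go]
      have hop : 1 ≤ old.length := by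
        cases old with
        | nil => exact absurd rfl hold
        | cons a b => simp
      by_cases hp : old.isPrefixOf (c :: t)
      · rw [if_pos hp]
        have hdrop : (c :: t).drop old.length = t.drop (old.length - 1) := by
          cases old with
          | nil => exact absurd rfl hold
          | cons a b => simp
        simp only [List.length_cons] at hl
        have hlen : ((c :: t).drop old.length).length ≤ n := by
          simp only [List.length_drop, List.length_cons]
          omega
        rw [ih _ _ hlen, hdrop]
        rw [pvRep]
        rw [if_pos hp]
        simp
      · rw [if_neg hp]
        have hlen : t.length ≤ n := by simp at hl; omega
        rw [ih _ _ hlen]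
        rw [pvRep]
        rw [if_neg hp]
        simp

theorem pvReplace_eq_pvRep (s old new : List Char) (hold : old ≠ []) :
    PySem.Chars.replace s old new = pvRep old new s := by
  rw [PySem.Chars.replace]
  rw [if_neg (by simpa [List.isEmpty_iff] using hold)]
  simpa using pvRep_go old new hold s.length s [] (le_refl _)

theorem pvRep_length_le (old new : List Char) (h1 : 1 ≤ old.length)
    (h2 : new.length ≤ old.length) (s : List Char) :
    (pvRep old new s).length ≤ s.length := by
  induction s using pvRep.induct (old := old) with
  | case1 => simp [pvRep]
  | case2 c t hp ih =>
    rw [pvRep, if_pos hp]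
    have hle : old.length ≤ t.length + 1 :=
      by simpa using (List.isPrefixOf_iff_prefix.mp hp).length_le
    simp only [List.length_append, List.length_cons]
    have := List.length_drop (l := t) (i := old.length - 1)
    omega
  | case3 c t hp ih =>
    rw [pvRep, if_neg hp]
    simpa using ih

theorem pvRep_length_lt (old new : List Char) (h1 : 1 ≤ old.length)
    (h2 : new.length < old.length) (s : List Char) (hin : old <:+: s) :
    (pvRep old new s).length < s.length := by
  induction s using pvRep.induct (old := old) with
  | case1 =>
    have := List.eq_nil_of_infix_nil hin
    subst this
    simp at h1
  | case2 c t hp ih =>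
    rw [pvRep, if_pos hp]
    have hle : old.length ≤ t.length + 1 :=
      by simpa using (List.isPrefixOf_iff_prefix.mp hp).length_le
    have hrec := pvRep_length_le old new h1 (Nat.le_of_lt h2) (t.drop (old.length - 1))
    simp only [List.length_append, List.length_cons]
    have := List.length_drop (l := t) (i := old.length - 1)
    omega
  | case3 c t hp ih =>
    rw [pvRep, if_neg hp]
    rcases List.infix_cons_iff.mp hin with hpre | hinf
    · exact absurd (List.isPrefixOf_iff_prefix.mpr hpre) (by simpa using hp)
    · simpa using ih hinf

theorem pvTerm1 (s : List Char) (h : PySem.Chars.isIn [' ', ','] s = true) :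
    (PySem.Chars.replace s [' ', ','] [',']).length < s.length := by
  rw [pvReplace_eq_pvRep _ _ _ (by simp)]
  exact pvRep_length_lt _ _ (by simp) (by simp) s ((PySem.Chars.isIn_iff_infix _ _).mp h)

theorem pvTerm2 (s : List Char) (h : PySem.Chars.isIn [',', ' '] s = true) :
    (PySem.Chars.replace s [',', ' '] [',']).length < s.length := by
  rw [pvReplace_eq_pvRep _ _ _ (by simp)]
  exact pvRep_length_lt _ _ (by simp) (by simp) s ((PySem.Chars.isIn_iff_infix _ _).mp h)

-- while ' ,' in input_string: input_string = input_string.replace(' ,', ',')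
def pvLoop1 (s : List Char) : List Char :=
  if h : PySem.Chars.isIn [' ', ','] s then
    pvLoop1 (PySem.Chars.replace s [' ', ','] [','])
  else s
termination_by s.length
decreasing_by exact pvTerm1 s h

-- while ', ' in input_string: input_string = input_string.replace(', ', ',')
def pvLoop2 (s : List Char) : List Char :=
  if h : PySem.Chars.isIn [',', ' '] s then
    pvLoop2 (PySem.Chars.replace s [',', ' '] [','])
  else s
termination_by s.length
decreasing_by exact pvTerm2 s h

def tagFormat (input_string : String) : String :=
  -- input_string.strip(',').lstrip(','); lstrip(',') is ported by hand as dropWhile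
  -- (exact: Python's lstrip(',') drops exactly the leading ',' characters)
  let s1 := (PySem.Chars.stripChars input_string.toList [',']).dropWhile
      (fun c => ([','] : List Char).contains c)
  let s2 := pvLoop1 s1
  let s3 := PySem.Chars.replace s2 [','] [',', ' ']
  let s4 := pvLoop2 s3
  let s5 := PySem.Chars.replace s4 [','] [',', ' ']
  String.mk s5

-- ===== PORT B =====
-- The Python list `rout` (a stack: append/pop at the right end) is ported as a cons-list
-- whose head is the stack top, the standard stack encoding.
def pvStep (c : Char) (acc : List Char) : List Char :=
  if c = ',' then
    ',' :: ' ' :: acc.dropWhile (fun x => x == ' ')   -- pop trailing ' ', push ' ', push ','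
  else if c = ' ' then
    -- len(rout) >= 2 and rout[-1] == ',' and rout[-2] == ' '  (stack top = head)
    if 2 ≤ acc.length ∧ acc.head? = some ',' ∧ acc[1]? = some ' ' then acc else ' ' :: acc
  else c :: acc

def tagFormat_alt (input_string : String) : String :=
  let s := PySem.Chars.stripChars input_string.toList [',']   -- input_string.strip(',')
  -- for c in reversed(s): rout = pvStep c rout   (rout starts empty)
  let rout := s.reverse.foldl (fun acc c => pvStep c acc) []
  -- ''.join(reversed(rout)): with the stack encoding, reversed(rout) is the list itself
  String.mk rout

-- ===== PRECONDITION & SPEC =====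
def Spec_tagFormat (input_string : String) (out : String) : Prop := out = tagFormat_alt input_string
instance (input_string : String) (out : String) : Decidable (Spec_tagFormat input_string out) := by unfold Spec_tagFormat; infer_instance

-- ===== CLAIM (what is proved, stated in full; the proofs are below) =====
def Claim_equal_tagFormat : Prop := ∀ (input_string : String), Dom_tagFormat input_string → Spec_tagFormat input_string (tagFormat input_string)

-- ===== LEMMAS AND PROOFS =====

-- Canonical forms: pvDel1 deletes every space that (through spaces) precedes a comma,
-- pvDel2 deletes every space run following a comma, pvExp writes each comma as ", ".
def pvDel1 : List Char → List Char
  | [] => []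
  | ' ' :: t => if (pvDel1 t).head? = some ',' then pvDel1 t else ' ' :: pvDel1 t
  | c :: t => c :: pvDel1 t

def pvDel2 : List Char → List Char
  | [] => []
  | ',' :: t => ',' :: pvDel2 (t.dropWhile (fun x => x == ' '))
  | c :: t => c :: pvDel2 t
termination_by l => l.length
decreasing_by
  all_goals simp only [List.length_cons]
  · exact Nat.lt_succ_of_le (List.length_dropWhile_le _ _)
  · omega

def pvExp : List Char → List Char
  | [] => []
  | ',' :: t => ',' :: ' ' :: pvExp t
  | c :: t => c :: pvExp t


theorem pvDel1_space (t : List Char) :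
    pvDel1 (' ' :: t) = if (pvDel1 t).head? = some ',' then pvDel1 t else ' ' :: pvDel1 t := rfl

theorem pvDel1_other (c : Char) (t : List Char) (hc : c ≠ ' ') :
    pvDel1 (c :: t) = c :: pvDel1 t := by
  rw [pvDel1.eq_def]
  split
  · simp_all
  · simp_all
  · rename_i heq
    cases heq
    rfl

theorem pvDel2_comma (t : List Char) :
    pvDel2 (',' :: t) = ',' :: pvDel2 (t.dropWhile (fun x => x == ' ')) := by
  rw [pvDel2]

theorem pvDel2_other (c : Char) (t : List Char) (hc : c ≠ ',') :
    pvDel2 (c :: t) = c :: pvDel2 t := by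
  rw [pvDel2.eq_def]
  split
  · simp_all
  · simp_all
  · rename_i heq
    cases heq
    rfl

theorem pvExp_comma (t : List Char) : pvExp (',' :: t) = ',' :: ' ' :: pvExp t := rfl

theorem pvExp_other (c : Char) (t : List Char) (hc : c ≠ ',') :
    pvExp (c :: t) = c :: pvExp t := by
  rw [pvExp.eq_def]
  split
  · simp_all
  · simp_all
  · rename_i heq
    cases heq
    rfl

theorem pvPrefix2 (a b c : Char) (t : List Char) (hp : ([a, b]).isPrefixOf (c :: t) = true) :
    c = a ∧ ∃ u, t = b :: u := by
  obtain ⟨r, hr⟩ := List.isPrefixOf_iff_prefix.mp hp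
  simp only [List.cons_append, List.nil_append] at hr
  injection hr with h1 h2
  exact ⟨h1.symm, r, h2.symm⟩

theorem pvRep_comma (s : List Char) : pvRep [','] [',', ' '] s = pvExp s := by
  induction s with
  | nil => rw [pvRep]; rfl
  | cons c t ih =>
    rw [pvRep]
    by_cases hc : c = ','
    · subst hc
      rw [if_pos (by simp [List.isPrefixOf])]
      simp [pvExp_comma, ih]
    · rw [if_neg (by simp [List.isPrefixOf]; exact fun h => hc h.symm)]
      rw [pvExp_other c t hc, ih]

theorem pvDel1_fix (s : List Char) (h : ¬ ([' ', ','] <:+: s)) : pvDel1 s = s := by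
  induction s with
  | nil => rfl
  | cons c t ih =>
    have ht : ¬ ([' ', ','] <:+: t) := fun hh => h (List.infix_cons_iff.mpr (Or.inr hh))
    by_cases hc : c = ' '
    · subst hc
      rw [pvDel1_space, ih ht]
      cases t with
      | nil => simp
      | cons c2 t2 =>
        by_cases hc2 : c2 = ','
        · subst hc2
          exact absurd ⟨[], t2, by simp⟩ h
        · simp [hc2]
    · rw [pvDel1_other c t hc, ih ht]

theorem pvDel2_fix (s : List Char) (h : ¬ ([',', ' '] <:+: s)) : pvDel2 s = s := by
  induction s with
  | nil => rw [pvDel2]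
  | cons c t ih =>
    have ht : ¬ ([',', ' '] <:+: t) := fun hh => h (List.infix_cons_iff.mpr (Or.inr hh))
    by_cases hc : c = ','
    · subst hc
      rw [pvDel2_comma]
      have hdw : t.dropWhile (fun x => x == ' ') = t := by
        cases t with
        | nil => rfl
        | cons c2 t2 =>
          by_cases hc2 : c2 = ' '
          · subst hc2
            exact absurd ⟨[], t2, by simp⟩ h
          · simp [List.dropWhile_cons, hc2]
      rw [hdw, ih ht]
    · rw [pvDel2_other c t hc, ih ht]

theorem pvDel1_rep (s : List Char) : pvDel1 (pvRep [' ', ','] [','] s) = pvDel1 s := by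
  induction s using pvRep.induct (old := [' ', ',']) with
  | case1 => rw [pvRep]
  | case2 c t hp ih =>
    obtain ⟨rfl, u, rfl⟩ := pvPrefix2 ' ' ',' c t hp
    rw [pvRep, if_pos hp]
    simp only [List.length_cons, List.length_nil] at ih ⊢
    have hd : List.drop (2 - 1) (',' :: u) = u := by simp
    rw [hd] at ih ⊢
    have hl : pvDel1 ([','] ++ pvRep [' ', ','] [','] u) = ',' :: pvDel1 (pvRep [' ', ','] [','] u) := by
      simpa using pvDel1_other ',' _ (by decide)
    rw [hl, ih, pvDel1_space]
    rw [pvDel1_other ',' u (by decide)]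
    simp
  | case3 c t hp ih =>
    rw [pvRep, if_neg hp]
    by_cases hc : c = ' '
    · subst hc
      rw [pvDel1_space, pvDel1_space, ih]
    · rw [pvDel1_other c _ hc, pvDel1_other c _ hc, ih]

-- dropWhile-space commutes with pvRep [',',' '] "," , pvExp and pvDel2
theorem pvDw_rep2 (s : List Char) :
    (pvRep [',', ' '] [','] s).dropWhile (fun x => x == ' ')
      = pvRep [',', ' '] [','] (s.dropWhile (fun x => x == ' ')) := by
  induction s with
  | nil => simp [pvRep]
  | cons c t ih =>
    by_cases hp : ([',', ' '] : List Char).isPrefixOf (c :: t) = true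
    · obtain ⟨rfl, u, rfl⟩ := pvPrefix2 ',' ' ' c t hp
      have hdw : List.dropWhile (fun x => x == ' ') (',' :: ' ' :: u) = ',' :: ' ' :: u := by
        simp [List.dropWhile_cons]
      rw [hdw, pvRep, if_pos hp]
      simp [List.dropWhile_cons]
    · rw [pvRep, if_neg hp]
      by_cases hc : c = ' '
      · subst hc
        simp only [List.dropWhile_cons]
        simpa using ih
      · simp [List.dropWhile_cons, hc]
        rw [pvRep, if_neg hp]

theorem pvDw_exp (s : List Char) :
    (pvExp s).dropWhile (fun x => x == ' ') = pvExp (s.dropWhile (fun x => x == ' ')) := by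
  induction s with
  | nil => rfl
  | cons c t ih =>
    by_cases hc : c = ','
    · subst hc
      have hdw : List.dropWhile (fun x => x == ' ') (',' :: t) = ',' :: t := by
        simp [List.dropWhile_cons]
      rw [hdw, pvExp_comma]
      simp [List.dropWhile_cons]
    · by_cases hs : c = ' '
      · subst hs
        rw [pvExp_other ' ' t (by decide)]
        simp only [List.dropWhile_cons]
        simpa using ih
      · rw [pvExp_other c t hc]
        simp [List.dropWhile_cons, hs]
        rw [pvExp_other c t hc]

theorem pvDw_del2 (s : List Char) :
    (pvDel2 s).dropWhile (fun x => x == ' ') = pvDel2 (s.dropWhile (fun x => x == ' ')) := by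
  induction s with
  | nil => simp [pvDel2]
  | cons c t ih =>
    by_cases hc : c = ','
    · subst hc
      rw [pvDel2_comma]
      simp [List.dropWhile_cons]
      rw [pvDel2_comma]
    · by_cases hs : c = ' '
      · subst hs
        rw [pvDel2_other ' ' t (by decide)]
        simp only [List.dropWhile_cons]
        simpa using ih
      · rw [pvDel2_other c t hc]
        simp [List.dropWhile_cons, hs]
        rw [pvDel2_other c t hc]

theorem pvDel2_rep_aux :
    ∀ (n : Nat) (s : List Char), s.length ≤ n →
      pvDel2 (pvRep [',', ' '] [','] s) = pvDel2 s := by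
  intro n
  induction n with
  | zero =>
    intro s hs
    have : s = [] := List.eq_nil_of_length_eq_zero (Nat.le_zero.mp hs)
    subst this
    rw [pvRep]
  | succ n ih =>
    intro s hs
    cases s with
    | nil => rw [pvRep]
    | cons c t =>
      simp only [List.length_cons] at hs
      by_cases hp : ([',', ' '] : List Char).isPrefixOf (c :: t) = true
      · obtain ⟨rfl, u, rfl⟩ := pvPrefix2 ',' ' ' c t hp
        rw [pvRep, if_pos hp]
        simp only [List.length_cons] at hs
        have hstep : List.drop (List.length [',', ' '] - 1) (' ' :: u) = u := by simp
        rw [hstep]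
        have hl : pvDel2 ([','] ++ pvRep [',', ' '] [','] u) =
            ',' :: pvDel2 ((pvRep [',', ' '] [','] u).dropWhile (fun x => x == ' ')) := by
          simpa using pvDel2_comma (pvRep [',', ' '] [','] u)
        rw [hl, pvDw_rep2]
        have hlen : (u.dropWhile (fun x => x == ' ')).length ≤ n :=
          le_trans (List.length_dropWhile_le _ _) (by omega)
        rw [ih _ hlen, pvDel2_comma]
        simp [List.dropWhile_cons]
      · rw [pvRep, if_neg hp]
        by_cases hc : c = ','
        · subst hc
          rw [pvDel2_comma, pvDel2_comma, pvDw_rep2]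
          have hlen : (t.dropWhile (fun x => x == ' ')).length ≤ n :=
            le_trans (List.length_dropWhile_le _ _) (by omega)
          rw [ih _ hlen]
        · rw [pvDel2_other c _ hc, pvDel2_other c _ hc, ih t (by omega)]

theorem pvDel2_rep (s : List Char) : pvDel2 (pvRep [',', ' '] [','] s) = pvDel2 s :=
  pvDel2_rep_aux s.length s (le_refl _)

theorem pvDel2_exp_aux :
    ∀ (n : Nat) (s : List Char), s.length ≤ n → pvDel2 (pvExp s) = pvDel2 s := by
  intro n
  induction n with
  | zero =>
    intro s hs
    have : s = [] := List.eq_nil_of_length_eq_zero (Nat.le_zero.mp hs)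
    subst this
    rfl
  | succ n ih =>
    intro s hs
    cases s with
    | nil => rfl
    | cons c t =>
      simp only [List.length_cons] at hs
      by_cases hc : c = ','
      · subst hc
        rw [pvExp_comma, pvDel2_comma, pvDel2_comma]
        simp only [List.dropWhile_cons]
        simp only [show ((' ' : Char) == ' ') = true from rfl, if_true]
        rw [pvDw_exp]
        have hlen : (t.dropWhile (fun x => x == ' ')).length ≤ n :=
          le_trans (List.length_dropWhile_le _ _) (by omega)
        rw [ih _ hlen]
      · rw [pvExp_other c t hc, pvDel2_other c _ hc, pvDel2_other c _ hc, ih t (by omega)]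

theorem pvDel2_exp (s : List Char) : pvDel2 (pvExp s) = pvDel2 s :=
  pvDel2_exp_aux s.length s (le_refl _)

theorem pvLoop1_eq (s : List Char) : pvLoop1 s = pvDel1 s := by
  induction s using pvLoop1.induct with
  | case1 s h ih =>
    rw [pvLoop1, dif_pos h, ih, pvReplace_eq_pvRep _ _ _ (by simp), pvDel1_rep]
  | case2 s h =>
    rw [pvLoop1, dif_neg h]
    have : ¬ ([' ', ','] <:+: s) :=
      (PySem.Chars.isIn_eq_false_iff _ _).mp (Bool.eq_false_iff.mpr h)
    exact (pvDel1_fix s this).symm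

theorem pvLoop2_eq (s : List Char) : pvLoop2 s = pvDel2 s := by
  induction s using pvLoop2.induct with
  | case1 s h ih =>
    rw [pvLoop2, dif_pos h, ih, pvReplace_eq_pvRep _ _ _ (by simp), pvDel2_rep]
  | case2 s h =>
    rw [pvLoop2, dif_neg h]
    have : ¬ ([',', ' '] <:+: s) :=
      (PySem.Chars.isIn_eq_false_iff _ _).mp (Bool.eq_false_iff.mpr h)
    exact (pvDel2_fix s this).symm

theorem pvHead_del2 (s : List Char) : (pvDel2 s).head? = s.head? := by
  cases s with
  | nil => rw [pvDel2]
  | cons c t =>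
    by_cases hc : c = ','
    · subst hc; rw [pvDel2_comma]; rfl
    · rw [pvDel2_other c t hc]; rfl

theorem pvHead_exp (s : List Char) : (pvExp s).head? = s.head? := by
  cases s with
  | nil => rfl
  | cons c t =>
    by_cases hc : c = ','
    · subst hc; rw [pvExp_comma]; rfl
    · rw [pvExp_other c t hc]; rfl

theorem pvB_core (s : List Char) :
    s.foldr pvStep [] = pvExp (pvDel2 (pvDel1 s)) := by
  induction s with
  | nil => simp [pvDel1, pvDel2, pvExp]
  | cons c t ih =>
    rw [List.foldr_cons, ih]
    by_cases hc : c = ','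
    · subst hc
      rw [pvStep, if_pos rfl, pvDw_exp, pvDw_del2]
      rw [pvDel1_other ',' t (by decide), pvDel2_comma, pvExp_comma]
    · by_cases hs : c = ' '
      · subst hs
        rw [pvStep, if_neg (by decide), if_pos rfl, pvDel1_space]
        by_cases hd : (pvDel1 t).head? = some ','
        · rw [if_pos hd]
          cases hd1 : pvDel1 t with
          | nil => rw [hd1] at hd; simp at hd
          | cons c0 u =>
            rw [hd1] at hd
            simp only [List.head?_cons, Option.some.injEq] at hd
            subst hd
            rw [pvDel2_comma, pvExp_comma]
            rw [if_pos (by simp)]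
        · rw [if_neg hd]
          rw [if_neg (fun hcond => hd (by
            have h2 := hcond.2.1
            rwa [pvHead_exp, pvHead_del2] at h2))]
          rw [pvDel2_other ' ' _ (by decide), pvExp_other ' ' _ (by decide)]
      · rw [pvStep, if_neg hc, if_neg hs]
        rw [pvDel1_other c t hs, pvDel2_other c _ hc, pvExp_other c _ hc]

theorem pvDw_of_head (p : Char → Bool) (l : List Char)
    (h : ∀ x, l.head? = some x → p x = false) : l.dropWhile p = l := by
  cases l with
  | nil => rfl
  | cons c t => rw [List.dropWhile_cons, if_neg (by simp [h c rfl])]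

theorem pvStrip_no_lead (s : List Char) :
    (PySem.Chars.stripChars s [',']).dropWhile (fun c => ([','] : List Char).contains c)
      = PySem.Chars.stripChars s [','] := by
  apply pvDw_of_head
  intro x hx
  simp only [PySem.Chars.stripChars] at hx
  rw [List.head?_reverse] at hx
  have hune : List.dropWhile (fun c => ([','] : List Char).contains c)
      ((List.dropWhile (fun c => ([','] : List Char).contains c) s).reverse) ≠ [] := by
    intro h0
    rw [h0] at hx
    simp at hx
  obtain ⟨w, hw⟩ := List.dropWhile_suffix (l := (List.dropWhile (fun c => ([','] : List Char).contains c) s).reverse)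
      (fun c => ([','] : List Char).contains c)
  have hx2 : (List.dropWhile (fun c => ([','] : List Char).contains c) s).reverse.getLast? = some x := by
    rw [← hw, List.getLast?_append_of_ne_nil _ hune]
    exact hx
  rw [List.getLast?_reverse] at hx2
  have hne : List.dropWhile (fun c => ([','] : List Char).contains c) s ≠ [] := by
    intro h0
    rw [h0] at hx2
    simp at hx2
  have hnp := List.head_dropWhile_not (fun c => ([','] : List Char).contains c) hne
  have hhead : (List.dropWhile (fun c => ([','] : List Char).contains c) s).head hne = x := by
    have h3 := List.head?_eq_head (l := List.dropWhile (fun c => ([','] : List Char).contains c) s) hne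
    rw [h3] at hx2
    exact Option.some.inj hx2
  rw [hhead] at hnp
  exact hnp

theorem pvMain (s : String) : tagFormat s = tagFormat_alt s := by
  have hb : (PySem.Chars.stripChars s.toList [',']).reverse.foldl (fun acc c => pvStep c acc) []
      = pvExp (pvDel2 (pvDel1 (PySem.Chars.stripChars s.toList [',']))) := by
    rw [List.foldl_reverse]
    exact pvB_core _
  simp only [tagFormat, tagFormat_alt]
  rw [pvStrip_no_lead, pvLoop1_eq, pvReplace_eq_pvRep _ _ _ (by simp), pvRep_comma,
      pvLoop2_eq, pvReplace_eq_pvRep _ _ _ (by simp), pvRep_comma, pvDel2_exp, hb]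

-- ===== VERDICT (by name: the statement is the Claim_ definition above) =====
theorem tagFormat_spec : Claim_equal_tagFormat := by
  intro s _
  unfold Spec_tagFormat
  exact pvMain s
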